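-- pv_equiv track=rewrite | github.com/LeonidSvb/cold-outreach | modules/openai/scripts/generate_soviet_boots_emails.py | detect_language
-- ===== SOURCE A (Python) =====
-- def detect_language(text: str, address: str = "") -> str:
--     """
--     Detect language from text content
--
--     Returns: language code (en, de, fr, nl, ru, sk, etc.)
--     """
--     if not text:
--         return "en"
--
--     # Simple keyword-based detection
--     text_lower = text.lower()
--
--     # Check by country in address first
--     if address:
--         address_lower = address.lower()
--         if "germany" in address_lower or "deutschland" in address_lower:
--             return "de"
--         elif "france" in address_lower:
--             return "fr"
--         elif "netherlands" in address_lower or "nederland" in address_lower: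
--             return "nl"
--         elif "serbia" in address_lower or "srbija" in address_lower:
--             return "sr"
--         elif "slovakia" in address_lower:
--             return "sk"
--         elif "russia" in address_lower:
--             return "ru"
--
--     # Fallback: check content for language patterns
--     if any(word in text_lower for word in ["der ", "die ", "das ", "und ", "für "]):
--         return "de"
--     elif any(word in text_lower for word in ["le ", "la ", "les ", "et ", "pour "]):
--         return "fr"
--     elif any(word in text_lower for word in ["de ", "het ", "een ", "van ", "voor "]):
--         return "nl"
--     elif any(word in text_lower for word in ["на ", "по ", "из ", "для "]):
--         return "ru"
--     elif any(word in text_lower for word in ["na ", "po ", "od ", "za "]):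
--         return "sr"
--
--     return "en"  # Default to English
-- ===== SOURCE B (Python) =====
-- # Different algorithm: instead of running a substring search per keyword, scan the
-- # text once, hash each fixed-length slice into a keyword->code dictionary, collect
-- # the set of matched language codes, and return the highest-priority matched code.
--
-- _ADDR_TABLE = {
--     "germany": "de", "deutschland": "de",
--     "france": "fr",
--     "netherlands": "nl", "nederland": "nl",
--     "serbia": "sr", "srbija": "sr",
--     "slovakia": "sk",
--     "russia": "ru",
-- }
-- _ADDR_LENS = (6, 7, 8, 9, 11)
-- _ADDR_PRIORITY = ("de", "fr", "nl", "sr", "sk", "ru")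
--
-- _CONTENT_TABLE = {
--     "der ": "de", "die ": "de", "das ": "de", "und ": "de", "f\u00fcr ": "de",
--     "le ": "fr", "la ": "fr", "les ": "fr", "et ": "fr", "pour ": "fr",
--     "de ": "nl", "het ": "nl", "een ": "nl", "van ": "nl", "voor ": "nl",
--     "\u043d\u0430 ": "ru", "\u043f\u043e ": "ru", "\u0438\u0437 ": "ru", "\u0434\u043b\u044f ": "ru",
--     "na ": "sr", "po ": "sr", "od ": "sr", "za ": "sr",
-- }
-- _CONTENT_LENS = (3, 4, 5)
-- _CONTENT_PRIORITY = ("de", "fr", "nl", "ru", "sr")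
--
--
-- def _matched_codes(table, lens, s):
--     found = set()
--     for i in range(len(s)):
--         for L in lens:
--             code = table.get(s[i:i + L])
--             if code is not None:
--                 found.add(code)
--     return found
--
--
-- def detect_language(text: str, address: str = "") -> str:
--     if not text:
--         return "en"
--     text_lower = text.lower()
--     if address:
--         found = _matched_codes(_ADDR_TABLE, _ADDR_LENS, address.lower())
--         for code in _ADDR_PRIORITY:
--             if code in found:
--                 return code
--     found = _matched_codes(_CONTENT_TABLE, _CONTENT_LENS, text_lower)
--     for code in _CONTENT_PRIORITY:
--         if code in found:
--             return code
--     return "en"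
-- ===== Notes on version B (the rewrite author's own statement) =====
-- stated objective: alternative
-- what changed: Instead of running a substring search per keyword through two if/elif cascades, B scans the string positions once, hashes each fixed-length slice into a keyword->code dictionary, collects the set of matched codes, and returns the first code of a priority list found in that set.
import Mathlib
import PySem

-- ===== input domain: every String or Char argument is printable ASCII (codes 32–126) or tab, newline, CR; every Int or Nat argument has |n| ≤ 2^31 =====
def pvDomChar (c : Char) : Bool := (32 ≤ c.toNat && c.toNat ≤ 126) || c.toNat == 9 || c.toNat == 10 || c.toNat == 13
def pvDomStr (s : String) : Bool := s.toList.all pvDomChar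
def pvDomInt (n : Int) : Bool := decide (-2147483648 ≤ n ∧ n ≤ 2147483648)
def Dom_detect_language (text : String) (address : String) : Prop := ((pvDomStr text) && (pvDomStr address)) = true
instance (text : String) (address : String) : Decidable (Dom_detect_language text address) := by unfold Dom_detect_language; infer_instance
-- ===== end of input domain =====

-- B replaces A's per-keyword substring-search cascades by a single positional scan that
-- hashes fixed-length slices into a keyword->code dictionary, collects the matched codes
-- in a set and returns the first code of a priority list found there (alternative algorithm).


-- ===== PORT A =====
-- literal transliteration; the early returns of the address block are modeled with an Option
def detect_language (text : String) (address : String) : String :=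
  if text = "" then "en"
  else
    let text_lower := PySem.Str.lower text
    let addrRes : Option String :=
      if address ≠ "" then
        let address_lower := PySem.Str.lower address
        if PySem.Str.isIn "germany" address_lower || PySem.Str.isIn "deutschland" address_lower then some "de"
        else if PySem.Str.isIn "france" address_lower then some "fr"
        else if PySem.Str.isIn "netherlands" address_lower || PySem.Str.isIn "nederland" address_lower then some "nl"
        else if PySem.Str.isIn "serbia" address_lower || PySem.Str.isIn "srbija" address_lower then some "sr"
        else if PySem.Str.isIn "slovakia" address_lower then some "sk"
        else if PySem.Str.isIn "russia" address_lower then some "ru"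
        else none
      else none
    match addrRes with
    | some r => r
    | none =>
      if ["der ", "die ", "das ", "und ", "für "].any (fun w => PySem.Str.isIn w text_lower) then "de"
      else if ["le ", "la ", "les ", "et ", "pour "].any (fun w => PySem.Str.isIn w text_lower) then "fr"
      else if ["de ", "het ", "een ", "van ", "voor "].any (fun w => PySem.Str.isIn w text_lower) then "nl"
      else if ["на ", "по ", "из ", "для "].any (fun w => PySem.Str.isIn w text_lower) then "ru"
      else if ["na ", "po ", "od ", "za "].any (fun w => PySem.Str.isIn w text_lower) then "sr"
      else "en"

-- ===== PORT B =====
def pvAddrTable : PySem.Dict String String := PySem.Dict.mk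
  [("germany", "de"), ("deutschland", "de"),
   ("france", "fr"),
   ("netherlands", "nl"), ("nederland", "nl"),
   ("serbia", "sr"), ("srbija", "sr"),
   ("slovakia", "sk"),
   ("russia", "ru")]

def pvAddrLens : List Int := [6, 7, 8, 9, 11]

def pvAddrPriority : List String := ["de", "fr", "nl", "sr", "sk", "ru"]

def pvContentTable : PySem.Dict String String := PySem.Dict.mk
  [("der ", "de"), ("die ", "de"), ("das ", "de"), ("und ", "de"), ("für ", "de"),
   ("le ", "fr"), ("la ", "fr"), ("les ", "fr"), ("et ", "fr"), ("pour ", "fr"),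
   ("de ", "nl"), ("het ", "nl"), ("een ", "nl"), ("van ", "nl"), ("voor ", "nl"),
   ("на ", "ru"), ("по ", "ru"), ("из ", "ru"), ("для ", "ru"),
   ("na ", "sr"), ("po ", "sr"), ("od ", "sr"), ("za ", "sr")]

def pvContentLens : List Int := [3, 4, 5]

def pvContentPriority : List String := ["de", "fr", "nl", "ru", "sr"]

-- one scan over the string positions, looking each fixed-length slice up in the dict
def pvMatchedCodes (table : PySem.Dict String String) (lens : List Int) (s : String) :
    PySem.Set String :=
  (PySem.List.pyRange 0 (PySem.Str.len s) 1).foldl (fun found i =>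
    lens.foldl (fun found L =>
      match table.get? (PySem.Str.slice s (some i) (some (i + L))) with
      | some code => PySem.Set.add found code
      | none => found) found) PySem.Set.empty

-- 'for code in priority: if code in found: return code'
def pvFirstIn : List String → PySem.Set String → Option String
  | [], _ => none
  | c :: cs, found => if PySem.Set.contains found c then some c else pvFirstIn cs found

def detect_language_alt (text : String) (address : String) : String :=
  if text = "" then "en"
  else
    let text_lower := PySem.Str.lower text
    let addrRes : Option String :=
      if address ≠ "" then
        pvFirstIn pvAddrPriority (pvMatchedCodes pvAddrTable pvAddrLens (PySem.Str.lower address))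
      else none
    match addrRes with
    | some c => c
    | none =>
      match pvFirstIn pvContentPriority (pvMatchedCodes pvContentTable pvContentLens text_lower) with
      | some c => c
      | none => "en"

-- ===== PRECONDITION & SPEC =====
def Spec_detect_language (text : String) (address : String) (out : String) : Prop := out = detect_language_alt text address
instance (text : String) (address : String) (out : String) : Decidable (Spec_detect_language text address out) := by unfold Spec_detect_language; infer_instance

-- ===== CLAIM (what is proved, stated in full; the proofs are below) =====
def Claim_equal_detect_language : Prop := ∀ (text : String) (address : String), Dom_detect_language text address → Spec_detect_language text address (detect_language text address)

-- ===== LEMMAS AND PROOFS =====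

-- membership in the inner fold over the keyword lengths
lemma pv_mem_inner (table : PySem.Dict String String) (lens : List Int) (s : String)
    (i : Int) (st : PySem.Set String) (c : String) :
    c ∈ lens.foldl (fun found L =>
      match table.get? (PySem.Str.slice s (some i) (some (i + L))) with
      | some code => PySem.Set.add found code
      | none => found) st ↔
    c ∈ st ∨ ∃ L ∈ lens, table.get? (PySem.Str.slice s (some i) (some (i + L))) = some c := by
  induction lens generalizing st with
  | nil => simp [List.foldl]
  | cons L rest ih =>
    rw [List.foldl_cons, ih]
    cases h : table.get? (PySem.Str.slice s (some i) (some (i + L))) with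
    | none =>
      constructor
      · rintro (hc | ⟨L', hL', hg⟩)
        exacts [Or.inl hc, Or.inr ⟨L', List.mem_cons_of_mem _ hL', hg⟩]
      · rintro (hc | ⟨L', hL', hg⟩)
        · exact Or.inl hc
        · rcases List.mem_cons.mp hL' with h1 | h1
          · subst h1; rw [h] at hg; cases hg
          · exact Or.inr ⟨L', h1, hg⟩
    | some code =>
      simp only [PySem.Set.mem_add]
      constructor
      · rintro ((hc | hc) | ⟨L', hL', hg⟩)
        · exact Or.inl hc
        · exact Or.inr ⟨L, List.mem_cons_self, by rw [h, hc]⟩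
        · exact Or.inr ⟨L', List.mem_cons_of_mem _ hL', hg⟩
      · rintro (hc | ⟨L', hL', hg⟩)
        · exact Or.inl (Or.inl hc)
        · rcases List.mem_cons.mp hL' with h1 | h1
          · subst h1; rw [h] at hg
            exact Or.inl (Or.inr (by injection hg with hh; exact hh.symm))
          · exact Or.inr ⟨L', h1, hg⟩

-- membership in the whole scan
lemma pv_mem_matched (table : PySem.Dict String String) (lens : List Int) (s : String) (c : String) :
    c ∈ pvMatchedCodes table lens s ↔
    ∃ i ∈ PySem.List.pyRange 0 (PySem.Str.len s) 1, ∃ L ∈ lens,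
      table.get? (PySem.Str.slice s (some i) (some (i + L))) = some c := by
  have key : ∀ (ys : List Int) (st : PySem.Set String),
      c ∈ ys.foldl (fun found i =>
        lens.foldl (fun found L =>
          match table.get? (PySem.Str.slice s (some i) (some (i + L))) with
          | some code => PySem.Set.add found code
          | none => found) found) st ↔
      c ∈ st ∨ ∃ i ∈ ys, ∃ L ∈ lens,
        table.get? (PySem.Str.slice s (some i) (some (i + L))) = some c := by
    intro ys
    induction ys with
    | nil => intro st; simp [List.foldl]
    | cons x rest ih =>
      intro st
      rw [List.foldl_cons, ih, pv_mem_inner]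
      constructor
      · rintro ((hc | ⟨L, hL, hg⟩) | ⟨i, hi, hrest⟩)
        · exact Or.inl hc
        · exact Or.inr ⟨x, List.mem_cons_self, L, hL, hg⟩
        · exact Or.inr ⟨i, List.mem_cons_of_mem _ hi, hrest⟩
      · rintro (hc | ⟨i, hi, hrest⟩)
        · exact Or.inl (Or.inl hc)
        · rcases List.mem_cons.mp hi with h1 | h1
          · subst h1; exact Or.inl (Or.inr hrest)
          · exact Or.inr ⟨i, h1, hrest⟩
  unfold pvMatchedCodes
  rw [key]
  simp [PySem.Set.empty]

-- a slice taken at a nonnegative position with nonnegative extent is an infix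
lemma pv_slice_infix (s : String) (i L : Int) (hi : 0 ≤ i) (hL : 0 ≤ L) :
    (PySem.Str.slice s (some i) (some (i + L))).toList <:+: s.toList := by
  rw [PySem.Str.toList_slice, PySem.Chars.slice_eq_listSlice,
    PySem.List.slice_toNat _ hi (by omega)]
  exact ((s.toList.drop i.toNat).take_prefix _).isInfix.trans
    (s.toList.drop_suffix i.toNat).isInfix

-- an infix keyword of the right length is hit by the scan
lemma pv_scan_hits (s k : String) (hk : k ≠ "") (hinf : k.toList <:+: s.toList) :
    ∃ i ∈ PySem.List.pyRange 0 (PySem.Str.len s) 1,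
      PySem.Str.slice s (some i) (some (i + (k.toList.length : Int))) = k := by
  obtain ⟨pre, suf, hps⟩ := hinf
  have hklen : 0 < k.toList.length := by
    rcases Nat.eq_zero_or_pos k.toList.length with h0 | h0
    · exact absurd (String.toList_eq_nil_iff.mp (List.length_eq_zero_iff.mp h0)) hk
    · exact h0
  refine ⟨(pre.length : Int), ?_, ?_⟩
  · rw [PySem.List.mem_pyRange_one]
    have hle : pre.length + k.toList.length ≤ s.toList.length := by
      rw [← hps]; simp
    simp only [PySem.Str.len_eq]
    omega
  · have hts : (PySem.Str.slice s (some (pre.length : Int))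
        (some ((pre.length : Int) + (k.toList.length : Int)))).toList = k.toList := by
      rw [PySem.Str.toList_slice, PySem.Chars.slice_eq_listSlice,
        PySem.List.slice_natCast_add, ← hps, List.append_assoc, List.drop_left,
        List.take_left]
    have := congrArg String.ofList hts
    simpa [String.ofList_toList] using this

-- membership in the scan result ↔ some table keyword is an infix, for well-shaped tables
lemma pv_mem_matched_infix (table : PySem.Dict String String) (lens : List Int) (s : String)
    (c : String)
    (hnd : table.keys.Nodup)
    (hlens : ∀ L ∈ lens, 0 < L)
    (hkeys : ∀ p ∈ table.items, p.1 ≠ "" ∧ ((p.1.toList.length : Int) ∈ lens)) :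
    c ∈ pvMatchedCodes table lens s ↔ ∃ k, (k, c) ∈ table.items ∧ k.toList <:+: s.toList := by
  rw [pv_mem_matched]
  constructor
  · rintro ⟨i, hi, L, hL, hg⟩
    refine ⟨_, PySem.Dict.mem_items_of_get?_eq_some table hg, ?_⟩
    have hi0 : 0 ≤ i := (PySem.List.mem_pyRange_one.mp hi).1
    exact pv_slice_infix s i L hi0 (le_of_lt (hlens L hL))
  · rintro ⟨k, hkc, hinf⟩
    obtain ⟨hne, hmem⟩ := hkeys _ hkc
    obtain ⟨i, hi, hslice⟩ := pv_scan_hits s k hne hinf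
    exact ⟨i, hi, (k.toList.length : Int), hmem,
      by rw [hslice]; exact PySem.Dict.get?_of_mem_items table hkc hnd⟩

-- the set-membership test, Bool-level, as A's disjunction of isIn tests (address table)
lemma pv_addr_contains (s c : String) :
    PySem.Set.contains (pvMatchedCodes pvAddrTable pvAddrLens s) c = true ↔
      ∃ k, (k, c) ∈ pvAddrTable.items ∧ k.toList <:+: s.toList := by
  rw [PySem.Set.contains_iff]
  exact pv_mem_matched_infix _ _ _ _ (by decide) (by decide) (by decide)

lemma pv_content_contains (s c : String) :
    PySem.Set.contains (pvMatchedCodes pvContentTable pvContentLens s) c = true ↔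
      ∃ k, (k, c) ∈ pvContentTable.items ∧ k.toList <:+: s.toList := by
  rw [PySem.Set.contains_iff]
  exact pv_mem_matched_infix _ _ _ _ (by decide) (by decide) (by decide)

lemma pv_b_addr_de (s : String) :
    PySem.Set.contains (pvMatchedCodes pvAddrTable pvAddrLens s) "de" =
      (PySem.Str.isIn "germany" s || (PySem.Str.isIn "deutschland" s)) := by
  rw [Bool.eq_iff_iff, pv_addr_contains]
  simp [pvAddrTable, PySem.Chars.isIn_iff_infix]

lemma pv_b_addr_fr (s : String) :
    PySem.Set.contains (pvMatchedCodes pvAddrTable pvAddrLens s) "fr" =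
      (PySem.Str.isIn "france" s) := by
  rw [Bool.eq_iff_iff, pv_addr_contains]
  simp [pvAddrTable, PySem.Chars.isIn_iff_infix]

lemma pv_b_addr_nl (s : String) :
    PySem.Set.contains (pvMatchedCodes pvAddrTable pvAddrLens s) "nl" =
      (PySem.Str.isIn "netherlands" s || (PySem.Str.isIn "nederland" s)) := by
  rw [Bool.eq_iff_iff, pv_addr_contains]
  simp [pvAddrTable, PySem.Chars.isIn_iff_infix]

lemma pv_b_addr_sr (s : String) :
    PySem.Set.contains (pvMatchedCodes pvAddrTable pvAddrLens s) "sr" =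
      (PySem.Str.isIn "serbia" s || (PySem.Str.isIn "srbija" s)) := by
  rw [Bool.eq_iff_iff, pv_addr_contains]
  simp [pvAddrTable, PySem.Chars.isIn_iff_infix]

lemma pv_b_addr_sk (s : String) :
    PySem.Set.contains (pvMatchedCodes pvAddrTable pvAddrLens s) "sk" =
      (PySem.Str.isIn "slovakia" s) := by
  rw [Bool.eq_iff_iff, pv_addr_contains]
  simp [pvAddrTable, PySem.Chars.isIn_iff_infix]

lemma pv_b_addr_ru (s : String) :
    PySem.Set.contains (pvMatchedCodes pvAddrTable pvAddrLens s) "ru" =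
      (PySem.Str.isIn "russia" s) := by
  rw [Bool.eq_iff_iff, pv_addr_contains]
  simp [pvAddrTable, PySem.Chars.isIn_iff_infix]

lemma pv_b_content_de (s : String) :
    PySem.Set.contains (pvMatchedCodes pvContentTable pvContentLens s) "de" =
      (PySem.Str.isIn "der " s || (PySem.Str.isIn "die " s || (PySem.Str.isIn "das " s || (PySem.Str.isIn "und " s || (PySem.Str.isIn "für " s))))) := by
  rw [Bool.eq_iff_iff, pv_content_contains]
  simp [pvContentTable, PySem.Chars.isIn_iff_infix]

lemma pv_b_content_fr (s : String) :
    PySem.Set.contains (pvMatchedCodes pvContentTable pvContentLens s) "fr" =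
      (PySem.Str.isIn "le " s || (PySem.Str.isIn "la " s || (PySem.Str.isIn "les " s || (PySem.Str.isIn "et " s || (PySem.Str.isIn "pour " s))))) := by
  rw [Bool.eq_iff_iff, pv_content_contains]
  simp [pvContentTable, PySem.Chars.isIn_iff_infix]

lemma pv_b_content_nl (s : String) :
    PySem.Set.contains (pvMatchedCodes pvContentTable pvContentLens s) "nl" =
      (PySem.Str.isIn "de " s || (PySem.Str.isIn "het " s || (PySem.Str.isIn "een " s || (PySem.Str.isIn "van " s || (PySem.Str.isIn "voor " s))))) := by
  rw [Bool.eq_iff_iff, pv_content_contains]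
  simp [pvContentTable, PySem.Chars.isIn_iff_infix]

lemma pv_b_content_ru (s : String) :
    PySem.Set.contains (pvMatchedCodes pvContentTable pvContentLens s) "ru" =
      (PySem.Str.isIn "на " s || (PySem.Str.isIn "по " s || (PySem.Str.isIn "из " s || (PySem.Str.isIn "для " s)))) := by
  rw [Bool.eq_iff_iff, pv_content_contains]
  simp [pvContentTable, PySem.Chars.isIn_iff_infix]

lemma pv_b_content_sr (s : String) :
    PySem.Set.contains (pvMatchedCodes pvContentTable pvContentLens s) "sr" =
      (PySem.Str.isIn "na " s || (PySem.Str.isIn "po " s || (PySem.Str.isIn "od " s || (PySem.Str.isIn "za " s)))) := by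
  rw [Bool.eq_iff_iff, pv_content_contains]
  simp [pvContentTable, PySem.Chars.isIn_iff_infix]

-- the priority scan over the address table equals A's address if/elif chain
lemma pv_addr_stage (s : String) :
    pvFirstIn pvAddrPriority (pvMatchedCodes pvAddrTable pvAddrLens s) =
      (if PySem.Str.isIn "germany" s || (PySem.Str.isIn "deutschland" s) then some "de"
      else if PySem.Str.isIn "france" s then some "fr"
      else if PySem.Str.isIn "netherlands" s || (PySem.Str.isIn "nederland" s) then some "nl"
      else if PySem.Str.isIn "serbia" s || (PySem.Str.isIn "srbija" s) then some "sr"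
      else if PySem.Str.isIn "slovakia" s then some "sk"
      else if PySem.Str.isIn "russia" s then some "ru"
      else none) := by
  simp only [pvAddrPriority, pvFirstIn, pv_b_addr_de, pv_b_addr_fr, pv_b_addr_nl,
    pv_b_addr_sr, pv_b_addr_sk, pv_b_addr_ru]

-- the priority scan over the content table equals A's content if/elif chain
lemma pv_content_stage (s : String) :
    (match pvFirstIn pvContentPriority (pvMatchedCodes pvContentTable pvContentLens s) with
     | some c => c
     | none => "en") =
      (if ["der ", "die ", "das ", "und ", "für "].any (fun w => PySem.Str.isIn w s) then "de"
      else if ["le ", "la ", "les ", "et ", "pour "].any (fun w => PySem.Str.isIn w s) then "fr"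
      else if ["de ", "het ", "een ", "van ", "voor "].any (fun w => PySem.Str.isIn w s) then "nl"
      else if ["на ", "по ", "из ", "для "].any (fun w => PySem.Str.isIn w s) then "ru"
      else if ["na ", "po ", "od ", "za "].any (fun w => PySem.Str.isIn w s) then "sr"
      else "en") := by
  simp only [pvContentPriority, pvFirstIn, pv_b_content_de, pv_b_content_fr, pv_b_content_nl,
    pv_b_content_ru, pv_b_content_sr, List.any_cons, List.any_nil, Bool.or_false]
  split_ifs <;> rfl

-- both programs dispatch on the same address result; their none-arms agree
lemma pv_match_congr (x : Option String) (yA yB : String) (h : yA = yB) :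
    (match x with | some r => r | none => yA) =
      (match x with | some c => c | none => yB) := by
  cases x <;> simp [h]

-- ===== VERDICT (by name: the statement is the Claim_ definition above) =====
theorem detect_language_spec : Claim_equal_detect_language := by
  intro text address _
  unfold Spec_detect_language detect_language detect_language_alt
  by_cases ht : text = ""
  · simp [ht]
  · rw [if_neg ht, if_neg ht]
    by_cases ha : address = ""
    · simp only [ha, ne_eq, not_true_eq_false, if_false]
      exact (pv_content_stage (PySem.Str.lower text)).symm
    · simp only [ne_eq, ha, not_false_eq_true, if_true, pv_addr_stage]
      exact pv_match_congr _ _ _ (pv_content_stage (PySem.Str.lower text)).symm
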